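-- pv_equiv track=rewrite | github.com/AnveshakR/Advent-Of-Code-2025 | day8/day8.py | build_circuits
-- ===== SOURCE A (Python) =====
-- def build_circuits(parent, num_circuits):
--     circuits = {}
--     for i in range(num_circuits):
--         root = find_root(parent, i)
--         if root not in circuits:
--             circuits[root] = set()
--         circuits[root].add(i)
--     return circuits
--
-- def find_root(parent, x):
--     if parent[x] != x:
--         parent[x] = find_root(parent, parent[x])
--     return parent[x]
-- ===== SOURCE B (Python) =====
-- def build_circuits(parent, num_circuits):
--     # Pure variant: resolves each element's root by iteratively chasing the
--     # parent links to their fixpoint; unlike A it never mutates `parent`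
--     # (no path compression), yet returns the identical grouping.
--     circuits = {}
--     for i in range(num_circuits):
--         r = i
--         while parent[r] != r:
--             r = parent[r]
--         circuits.setdefault(r, set()).add(i)
--     return circuits
-- ===== Notes on version B (the rewrite author's own statement) =====
-- stated objective: alternative
-- what changed: A resolves roots with a recursive, path-compressing find_root that mutates parent in place; B drops compression and mutation entirely, resolving each root by a pure iterative fixpoint chase and grouping with dict.setdefault (same return value; B does not perform A's in-place mutation of parent).
import Mathlib
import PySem

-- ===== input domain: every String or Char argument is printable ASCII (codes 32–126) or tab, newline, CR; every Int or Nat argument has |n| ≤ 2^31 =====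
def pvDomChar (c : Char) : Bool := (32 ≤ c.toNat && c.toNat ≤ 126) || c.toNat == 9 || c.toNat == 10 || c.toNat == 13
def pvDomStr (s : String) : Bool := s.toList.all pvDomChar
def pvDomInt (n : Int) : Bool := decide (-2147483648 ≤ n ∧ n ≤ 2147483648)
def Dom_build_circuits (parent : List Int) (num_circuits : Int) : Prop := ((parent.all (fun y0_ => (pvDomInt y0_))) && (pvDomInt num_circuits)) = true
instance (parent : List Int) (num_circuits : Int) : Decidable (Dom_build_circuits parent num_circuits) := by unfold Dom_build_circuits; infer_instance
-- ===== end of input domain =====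

-- B drops A's recursive path compression and its in-place mutation of `parent` entirely:
-- each root is found by a pure iterative fixpoint chase and grouped via dict.setdefault.
-- Same return value on Pre_; B does NOT perform A's observable mutation of `parent`.

-- ===== PORT A =====
-- find_root(parent, x), recursive with path compression; fuel totalizes the port
-- (fuel parent.length + 2 suffices whenever the Python terminates: the chain values are
-- pairwise distinct, hence the chain has at most parent.length + 1 nodes); none = exception.
def find_root_fuel : Nat → List Int → Int → Option (List Int × Int)
  | 0, _, _ => none
  | f+1, parent, x =>
    match PySem.List.pyGet? parent x with
    | none => none
    | some px =>
      if px ≠ x then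
        match find_root_fuel f parent px with
        | none => none
        | some (p1, r) =>
          let p2 := PySem.List.pySetD p1 x r          -- parent[x] = find_root(parent, parent[x])
          match PySem.List.pyGet? p2 x with           -- return parent[x]
          | none => none
          | some v => some (p2, v)
      else some (parent, px)                           -- return parent[x] (= x)

-- the 'for i in range(num_circuits)' loop of A, threading the mutated parent
def buildA_loop : List Int → List Int → PySem.Dict Int (List Int) → Option (List Int × PySem.Dict Int (List Int))
  | [], parent, circuits => some (parent, circuits)
  | i :: rest, parent, circuits =>
    match find_root_fuel (parent.length + 2) parent i with
    | none => none
    | some (p', root) =>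
      let c1 := if circuits.get? root = none then circuits.insert root ([] : List Int) else circuits
      let c2 := c1.modify root [] (fun s => PySem.Set.add s i)   -- circuits[root].add(i)
      buildA_loop rest p' c2

def build_circuits (parent : List Int) (num_circuits : Int) : List (Int × List Int) :=
  match buildA_loop (PySem.List.pyRange 0 num_circuits 1) parent PySem.Dict.empty with
  | some (_, c) => c.items
  | none => []    -- Python raised here (outside Pre_)

-- ===== PORT B =====
-- 'r = i; while parent[r] != r: r = parent[r]' — pure chase, parent is never written;
-- fuel parent.length + 2 suffices on Pre_ (the chain reaches its root within length+1 steps).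
def chase : Nat → List Int → Int → Option Int
  | 0, _, _ => none
  | f+1, parent, r =>
    match PySem.List.pyGet? parent r with
    | none => none
    | some pr => if pr ≠ r then chase f parent pr else some r

-- B's loop: `parent` is read-only, only the dict is threaded
def buildB_loop (parent : List Int) : List Int → PySem.Dict Int (List Int) → Option (PySem.Dict Int (List Int))
  | [], circuits => some circuits
  | i :: rest, circuits =>
    match chase (parent.length + 2) parent i with
    | none => none
    | some r =>
      let c1 := circuits.setdefault r PySem.Set.empty            -- circuits.setdefault(r, set())
      let c2 := c1.insert r (PySem.Set.add (c1.getD r PySem.Set.empty) i)   -- .add(i)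
      buildB_loop parent rest c2

def build_circuits_alt (parent : List Int) (num_circuits : Int) : List (Int × List Int) :=
  match buildB_loop parent (PySem.List.pyRange 0 num_circuits 1) PySem.Dict.empty with
  | some c => c.items
  | none => []

-- ===== PRECONDITION & SPEC =====
-- one step along the parent links (out-of-range values are left fixed; the final
-- membership check below then fails, so such chains are excluded)
def pvStep (parent : List Int) (x : Int) : Int := (PySem.List.pyGet? parent x).getD x
-- Pre_: exactly the inputs where A returns normally: every queried index's parent chain
-- reaches a self-parented root through in-range links (otherwise Python raises
-- IndexError / RecursionError).
def Pre_build_circuits (parent : List Int) (num_circuits : Int) : Prop :=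
  num_circuits ≤ (parent.length : Int) ∧
  ∀ i ∈ PySem.List.pyRange 0 num_circuits 1,
    PySem.List.pyGet? parent ((pvStep parent)^[parent.length + 1] i)
      = some ((pvStep parent)^[parent.length + 1] i)
instance (parent : List Int) (num_circuits : Int) : Decidable (Pre_build_circuits parent num_circuits) := by
  unfold Pre_build_circuits; infer_instance

def pvWitness_build_circuits : List Int × Int := ([1, 1, 0, 2], 4)

def Spec_build_circuits (parent : List Int) (num_circuits : Int) (out : List (Int × List Int)) : Prop := out = build_circuits_alt parent num_circuits
instance (parent : List Int) (num_circuits : Int) (out : List (Int × List Int)) : Decidable (Spec_build_circuits parent num_circuits out) := by unfold Spec_build_circuits; infer_instance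

-- ===== CLAIM (what is proved, stated in full; the proofs are below) =====
def Claim_equal_build_circuits : Prop := ∀ (parent : List Int) (num_circuits : Int), Dom_build_circuits parent num_circuits → Pre_build_circuits parent num_circuits → Spec_build_circuits parent num_circuits (build_circuits parent num_circuits)

-- ===== LEMMAS AND PROOFS =====

-- s is a root of p ('parent[s] == s')
def pvRoot (p : List Int) (s : Int) : Prop := PySem.List.pyGet? p s = some s
-- x's parent chain in p reaches the root s
def pvReach (p : List Int) (x s : Int) : Prop :=
  (∃ n, (pvStep p)^[n] x = s) ∧ pvRoot p s

lemma root_step (p : List Int) (s : Int) (h : pvRoot p s) : pvStep p s = s := by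
  unfold pvStep; rw [h]; rfl

lemma fix_iter (p : List Int) (s : Int) (h : pvStep p s = s) :
    ∀ m, (pvStep p)^[m] s = s := by
  intro m
  induction m with
  | zero => rfl
  | succ m ih => rw [Function.iterate_succ_apply, h, ih]

lemma reach_det (p : List Int) (x r s : Int) (hr : pvReach p x r) (hs : pvReach p x s) :
    r = s := by
  obtain ⟨⟨n, hn⟩, hrr⟩ := hr
  obtain ⟨⟨m, hm⟩, hsr⟩ := hs
  rcases le_total n m with h | h
  · have : (pvStep p)^[m] x = r := by
      rw [show m = (m - n) + n by omega, Function.iterate_add_apply, hn,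
        fix_iter p r (root_step p r hrr)]
    rw [this] at hm; exact hm
  · have : (pvStep p)^[n] x = s := by
      rw [show n = (n - m) + m by omega, Function.iterate_add_apply, hm,
        fix_iter p s (root_step p s hsr)]
    rw [this] at hn; exact hn.symm

lemma reach_prepend (p : List Int) (x s : Int) (h : pvReach p (pvStep p x) s) :
    pvReach p x s := by
  obtain ⟨⟨n, hn⟩, hr⟩ := h
  exact ⟨⟨n + 1, by rw [Function.iterate_succ_apply, hn]⟩, hr⟩

lemma reach_trans (p : List Int) (x y s : Int) (hxy : ∃ n, (pvStep p)^[n] x = y)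
    (h : pvReach p y s) : pvReach p x s := by
  obtain ⟨n, hn⟩ := hxy
  obtain ⟨⟨m, hm⟩, hr⟩ := h
  exact ⟨⟨m + n, by rw [Function.iterate_add_apply, hn, hm]⟩, hr⟩

-- if x and y step to the same place, x reaches y's root
lemma step_eq_of_get_eq (p : List Int) (x y : Int)
    (h : PySem.List.pyGet? p x = PySem.List.pyGet? p y)
    (hsome : (PySem.List.pyGet? p x).isSome) : pvStep p x = pvStep p y := by
  obtain ⟨v, hv⟩ := Option.isSome_iff_exists.mp hsome
  unfold pvStep
  rw [hv, ← h, hv]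
  rfl

lemma reach_congr_step (p : List Int) (x y r : Int) (hstep : pvStep p x = pvStep p y)
    (h : pvReach p y r) : pvReach p x r := by
  obtain ⟨⟨m, hm⟩, hr⟩ := h
  cases m with
  | zero =>
      simp only [Function.iterate_zero, id_eq] at hm
      refine ⟨⟨1, ?_⟩, hr⟩
      simp only [Function.iterate_one]
      rw [hstep, hm]
      exact root_step p r hr
  | succ k =>
      refine ⟨⟨k + 1, ?_⟩, hr⟩
      rw [Function.iterate_succ_apply, hstep, ← Function.iterate_succ_apply]
      exact hm

lemma pyIdx?_lt (n : Nat) (i : Int) (k : Nat) (h : PySem.List.pyIdx? n i = some k) : k < n := by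
  unfold PySem.List.pyIdx? at h
  split_ifs at h <;> simp_all <;> omega

-- how a single write parent[y] := r is seen by reads: either unchanged, or x shares
-- y's slot and reads r (in that case x and y stepped alike before the write)
lemma pyGet?_write_cases (p : List Int) (y r x : Int) :
    PySem.List.pyGet? (PySem.List.pySetD p y r) x = PySem.List.pyGet? p x ∨
    (PySem.List.pyGet? (PySem.List.pySetD p y r) x = some r ∧
      PySem.List.pyGet? p x = PySem.List.pyGet? p y ∧
      (PySem.List.pyGet? p x).isSome) := by
  cases hky : PySem.List.pyIdx? p.length y with
  | none =>
      left
      have hq : PySem.List.pySetD p y r = p := by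
        simp [PySem.List.pySetD, PySem.List.pySet?, hky]
      rw [hq]
  | some ky =>
      have hq : PySem.List.pySetD p y r = p.set ky r := by
        simp [PySem.List.pySetD, PySem.List.pySet?, hky]
      have hkylt : ky < p.length := pyIdx?_lt p.length y ky hky
      cases hkx : PySem.List.pyIdx? p.length x with
      | none =>
          left
          simp [PySem.List.pyGet?, hq, hkx]
      | some kx =>
          have hkxlt : kx < p.length := pyIdx?_lt p.length x kx hkx
          by_cases hk : kx = ky
          · right
            subst hk
            refine ⟨?_, ?_, ?_⟩
            · simp [PySem.List.pyGet?, hq, hkx, List.getElem?_set, hkxlt]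
            · simp [PySem.List.pyGet?, hkx, hky]
            · simp [PySem.List.pyGet?, hkx, hkxlt]
          · left
            simp only [PySem.List.pyGet?, hq, List.length_set, hkx, Option.bind_some,
              List.getElem?_set]
            rw [if_neg (fun h => hk h.symm)]

lemma root_write (p : List Int) (y r s : Int) (hyr : pvReach p y r) (hs : pvRoot p s) :
    pvRoot (PySem.List.pySetD p y r) s := by
  rcases pyGet?_write_cases p y r s with h | ⟨h1, h2, _⟩
  · unfold pvRoot; rw [h]; exact hs
  · have hys : pvReach p y s := by
      refine reach_congr_step p y s s ?_ ⟨⟨0, rfl⟩, hs⟩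
      have hy : PySem.List.pyGet? p y = some s := by rw [← h2]; exact hs
      unfold pvStep
      rw [hy, hs]
      rfl
    have := reach_det p y r s hyr hys
    unfold pvRoot; rw [h1, this]
  -- (branch 2: the written slot is s's slot, so r = s by determinism)

lemma root_unwrite (p : List Int) (y r s : Int) (hyr : pvReach p y r)
    (hs : pvRoot (PySem.List.pySetD p y r) s) : pvRoot p s := by
  rcases pyGet?_write_cases p y r s with h | ⟨h1, _, _⟩
  · unfold pvRoot at hs ⊢; rw [← h]; exact hs
  · unfold pvRoot at hs
    rw [h1] at hs
    cases hs
    exact hyr.2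

-- a root-write never lengthens any chain (the invariant that keeps A's fuel sufficient)
lemma write_shorten (p : List Int) (y r : Int) (hyr : pvReach p y r) :
    ∀ n x s, (pvStep p)^[n] x = s → pvRoot p s →
      ∃ m ≤ n, (pvStep (PySem.List.pySetD p y r))^[m] x = s := by
  intro n
  induction n with
  | zero => intro x s h _; exact ⟨0, le_refl 0, h⟩
  | succ n ih =>
      intro x s h hs
      rw [Function.iterate_succ_apply] at h
      rcases pyGet?_write_cases p y r x with hc | ⟨h1, h2, _⟩
      · obtain ⟨m, hm, hit⟩ := ih (pvStep p x) s h hs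
        refine ⟨m + 1, by omega, ?_⟩
        rw [Function.iterate_succ_apply]
        have : pvStep (PySem.List.pySetD p y r) x = pvStep p x := by
          unfold pvStep; rw [hc]
        rw [this]; exact hit
      · -- x shares y's slot: the compressed chain jumps straight to r = s's root
        have hxy : pvStep p x = pvStep p y := step_eq_of_get_eq p x y h2 (by assumption)
        have hxs : pvReach p x s := reach_prepend p x s ⟨⟨n, h⟩, hs⟩
        have hys : pvReach p y s := reach_congr_step p y x s hxy.symm hxs
        have hrs : r = s := reach_det p y r s hyr hys
        refine ⟨1, by omega, ?_⟩
        simp only [Function.iterate_one]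
        unfold pvStep; rw [h1, hrs]; rfl

-- a root-write never creates new reachability facts
lemma write_forward (p : List Int) (y r : Int) (hyr : pvReach p y r) :
    ∀ n x s, (pvStep (PySem.List.pySetD p y r))^[n] x = s →
      pvRoot (PySem.List.pySetD p y r) s → pvReach p x s := by
  intro n
  induction n with
  | zero =>
      intro x s h hs
      cases h
      exact ⟨⟨0, rfl⟩, root_unwrite p y r x hyr hs⟩
  | succ n ih =>
      intro x s h hs
      rw [Function.iterate_succ_apply] at h
      rcases pyGet?_write_cases p y r x with hc | ⟨h1, h2, _⟩
      · have hstep : pvStep (PySem.List.pySetD p y r) x = pvStep p x := by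
          unfold pvStep; rw [hc]
        rw [hstep] at h
        exact reach_prepend p x s (ih (pvStep p x) s h hs)
      · have hstep : pvStep (PySem.List.pySetD p y r) x = r := by
          unfold pvStep; rw [h1]; rfl
        rw [hstep] at h
        have hrs : pvReach p r s := ih r s h hs
        have hxy : pvStep p x = pvStep p y := step_eq_of_get_eq p x y h2 (by assumption)
        have hxr : pvReach p x r := reach_congr_step p x y r hxy hyr
        exact reach_trans p x r s hxr.1 hrs

-- reading back x right after writing at x yields the written value (x known in range
-- from a prior successful read on a list of the same length)
lemma pyGet?_wset_self (p q : List Int) (x px r : Int)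
    (hq : q.length = p.length) (h : PySem.List.pyGet? p x = some px) :
    PySem.List.pyGet? (PySem.List.pySetD q x r) x = some r := by
  cases hk : PySem.List.pyIdx? p.length x with
  | none => rw [PySem.List.pyGet?, hk] at h; simp at h
  | some k =>
      have hkq : PySem.List.pyIdx? q.length x = some k := by rw [hq, hk]
      have hlt : k < q.length := by rw [hq]; exact pyIdx?_lt p.length x k hk
      have hset : PySem.List.pySetD q x r = q.set k r := by
        simp [PySem.List.pySetD, PySem.List.pySet?, hkq]
      rw [PySem.List.pyGet?, hset]
      simp only [List.length_set, hkq, Option.bind_some, List.getElem?_set]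
      simp [hlt]

-- one link of the chain as pvStep
lemma step_of_get (p : List Int) (x px : Int) (h : PySem.List.pyGet? p x = some px) :
    pvStep p x = px := by unfold pvStep; rw [h]; rfl

-- a none-read means the chain is stuck at x, so x cannot reach any root
lemma none_no_root (p : List Int) (x s : Int) (n : Nat)
    (hg : PySem.List.pyGet? p x = none) (hit : (pvStep p)^[n] x = s) (hs : pvRoot p s) :
    False := by
  have hfix : pvStep p x = x := by unfold pvStep; rw [hg]; rfl
  rw [fix_iter p x hfix n] at hit
  rw [← hit] at hs
  unfold pvRoot at hs
  rw [hg] at hs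
  cases hs

-- characterization of A's find_root: the returned root is x's root in the pre-state, and
-- the mutated list has the same reachability relation with no chain made longer
lemma A_find : ∀ (f : Nat) (p : List Int) (x : Int) (p' : List Int) (r : Int),
    find_root_fuel f p x = some (p', r) →
      p'.length = p.length ∧ pvReach p x r ∧
      (∀ z s, pvReach p' z s → pvReach p z s) ∧
      (∀ n z s, (pvStep p)^[n] z = s → pvRoot p s →
        ∃ m ≤ n, (pvStep p')^[m] z = s ∧ pvRoot p' s) := by
  intro f
  induction f with
  | zero => intro p x p' r h; cases h
  | succ f ih =>
      intro p x p' r h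
      rw [find_root_fuel] at h
      cases hg : PySem.List.pyGet? p x with
      | none => simp [hg] at h
      | some px =>
          simp only [hg] at h
          by_cases hpx : px ≠ x
          · rw [if_pos hpx] at h
            cases hrec : find_root_fuel f p px with
            | none => simp [hrec] at h
            | some pr1 =>
                obtain ⟨p1, r1⟩ := pr1
                simp only [hrec] at h
                obtain ⟨hlen1, hreach1, hfwd1, hbnd1⟩ := ih p px p1 r1 hrec
                have hget2 : PySem.List.pyGet? (PySem.List.pySetD p1 x r1) x = some r1 :=
                  pyGet?_wset_self p p1 x px r1 hlen1 hg
                simp only [hget2, Option.some.injEq, Prod.mk.injEq] at h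
                obtain ⟨hp', hr'⟩ := h
                subst hp'
                subst hr'
                have hreachx : pvReach p x r1 :=
                  reach_prepend p x r1 (by rw [step_of_get p x px hg]; exact hreach1)
                have hreachp1 : pvReach p1 x r1 := by
                  obtain ⟨⟨n, hn⟩, hroot⟩ := hreachx
                  obtain ⟨m, _, hm, hr⟩ := hbnd1 n x r1 hn hroot
                  exact ⟨⟨m, hm⟩, hr⟩
                refine ⟨?_, hreachx, ?_, ?_⟩
                · rw [PySem.List.length_pySetD]; exact hlen1
                · intro z s hz
                  obtain ⟨⟨n, hn⟩, hroot⟩ := hz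
                  exact hfwd1 z s (write_forward p1 x r1 hreachp1 n z s hn hroot)
                · intro n z s hit hroot
                  obtain ⟨m1, hm1, hit1, hr1⟩ := hbnd1 n z s hit hroot
                  obtain ⟨m2, hm2, hit2⟩ := write_shorten p1 x r1 hreachp1 m1 z s hit1 hr1
                  exact ⟨m2, le_trans hm2 hm1, hit2,
                    root_write p1 x r1 s hreachp1 hr1⟩
          · rw [if_neg hpx] at h
            simp only [Option.some.injEq, Prod.mk.injEq] at h
            obtain ⟨hp', hr'⟩ := h
            subst hp'
            subst hr'
            rw [not_not] at hpx
            subst hpx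
            have hroot : pvRoot p px := hg
            refine ⟨rfl, ⟨⟨0, rfl⟩, hroot⟩, fun z s h => h, ?_⟩
            intro n z s hit hr
            exact ⟨n, le_refl n, hit, hr⟩

-- A's find_root returns whenever the chain reaches a root within the fuel
lemma A_complete : ∀ (n f : Nat) (p : List Int) (x s : Int), n < f →
    (pvStep p)^[n] x = s → pvRoot p s → (find_root_fuel f p x).isSome := by
  intro n
  induction n with
  | zero =>
      intro f p x s hf hit hs
      cases hit
      simp only [Function.iterate_zero, id_eq] at hs
      cases f with
      | zero => omega
      | succ f =>
          rw [find_root_fuel]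
          unfold pvRoot at hs
          simp only [hs]
          simp
  | succ n ih =>
      intro f p x s hf hit hs
      cases f with
      | zero => omega
      | succ f =>
          rw [find_root_fuel]
          cases hg : PySem.List.pyGet? p x with
          | none => exact absurd (none_no_root p x s (n + 1) hg hit hs) (fun h => h)
          | some px =>
              simp only []
              by_cases hpx : px ≠ x
              · rw [if_pos hpx]
                rw [Function.iterate_succ_apply, step_of_get p x px hg] at hit
                have hrec := ih f p px s (by omega) hit hs
                cases hrecv : find_root_fuel f p px with
                | none => rw [hrecv] at hrec; cases hrec
                | some pr1 =>
                    obtain ⟨p1, r1⟩ := pr1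
                    simp only []
                    obtain ⟨hlen1, _, _, _⟩ := A_find f p px p1 r1 hrecv
                    rw [pyGet?_wset_self p p1 x px r1 hlen1 hg]
                    rfl
              · rw [if_neg hpx]
                rfl

-- B's chase returns exactly the chain's root whenever it is reached within the fuel
lemma chase_complete : ∀ (n f : Nat) (p : List Int) (x s : Int), n < f →
    (pvStep p)^[n] x = s → pvRoot p s → chase f p x = some s := by
  intro n
  induction n with
  | zero =>
      intro f p x s hf hit hs
      cases hit
      simp only [Function.iterate_zero, id_eq] at hs
      cases f with
      | zero => omega
      | succ f =>
          rw [chase]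
          unfold pvRoot at hs
          simp only [hs]
          simp
  | succ n ih =>
      intro f p x s hf hit hs
      cases f with
      | zero => omega
      | succ f =>
          rw [chase]
          cases hg : PySem.List.pyGet? p x with
          | none => exact absurd (none_no_root p x s (n + 1) hg hit hs) (fun h => h)
          | some px =>
              simp only []
              rw [Function.iterate_succ_apply, step_of_get p x px hg] at hit
              by_cases hpx : px ≠ x
              · rw [if_pos hpx]
                exact ih f p px s (by omega) hit hs
              · rw [if_neg hpx]
                rw [not_not] at hpx
                subst hpx
                have hfix : pvStep p px = px := root_step p px hg
                rw [fix_iter p px hfix n] at hit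
                rw [hit]

-- A's dict update (membership test + add) equals B's setdefault + add
lemma dict_step (c : PySem.Dict Int (List Int)) (root i : Int) :
    (if c.get? root = none then c.insert root ([] : List Int) else c).modify root []
        (fun s => PySem.Set.add s i)
      = (let c1 := c.setdefault root PySem.Set.empty
         c1.insert root (PySem.Set.add (c1.getD root PySem.Set.empty) i)) := by
  by_cases h : c.get? root = none
  · have hc : c.contains root = false := by
      rw [PySem.Dict.contains_eq_isSome_get?, h]; rfl
    rw [PySem.Dict.setdefault_of_not_contains c PySem.Set.empty hc]
    simp [h, PySem.Dict.modify]
  · have hc : c.contains root = true := by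
      rw [PySem.Dict.contains_eq_isSome_get?]
      cases hg : c.get? root with
      | none => exact absurd hg h
      | some s => rfl
    rw [PySem.Dict.setdefault_of_contains c PySem.Set.empty hc]
    simp [h, PySem.Dict.modify]

-- the two loops agree: A's threaded parent pA stays root-equivalent to the pristine p0
lemma loops_eq (p0 : List Int) : ∀ (idxs pA : List Int) (c : PySem.Dict Int (List Int)),
    pA.length = p0.length →
    (∀ z s, pvReach pA z s → pvReach p0 z s) →
    (∀ i ∈ idxs, ∃ r n, n ≤ p0.length + 1 ∧ (pvStep pA)^[n] i = r ∧ pvRoot pA r) →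
    (∀ i ∈ idxs, pvRoot p0 ((pvStep p0)^[p0.length + 1] i)) →
    (buildA_loop idxs pA c).map Prod.snd = buildB_loop p0 idxs c := by
  intro idxs
  induction idxs with
  | nil => intro pA c _ _ _ _; rfl
  | cons i rest ih =>
      intro pA c hlen hfwd hA h0
      obtain ⟨r, n, hn, hit, hroot⟩ := hA i (List.mem_cons_self)
      have hsome := A_complete n (pA.length + 2) pA i r (by omega) hit hroot
      cases hfind : find_root_fuel (pA.length + 2) pA i with
      | none => rw [hfind] at hsome; cases hsome
      | some pr =>
          obtain ⟨p', rA⟩ := pr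
          obtain ⟨hlen', hreachA, hfwd', hbnd'⟩ := A_find (pA.length + 2) pA i p' rA hfind
          -- B's root on the pristine list
          have hreach0A : pvReach p0 i rA := hfwd i rA hreachA
          have hreach00 : pvReach p0 i ((pvStep p0)^[p0.length + 1] i) :=
            ⟨⟨p0.length + 1, rfl⟩, h0 i (List.mem_cons_self)⟩
          have hrr : rA = (pvStep p0)^[p0.length + 1] i :=
            reach_det p0 i rA _ hreach0A hreach00
          have hchase : chase (p0.length + 2) p0 i = some rA := by
            rw [hrr]
            exact chase_complete (p0.length + 1) (p0.length + 2) p0 i _ (by omega) rfl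
              (h0 i (List.mem_cons_self))
          rw [buildA_loop, buildB_loop, hfind, hchase]
          simp only
          rw [dict_step]
          exact ih p' _ (hlen'.trans hlen)
            (fun z s hz => hfwd z s (hfwd' z s hz))
            (fun i' hi' => by
              obtain ⟨r', n', hn', hit', hroot'⟩ := hA i' (List.mem_cons_of_mem i hi')
              obtain ⟨m, hm, hitm, hrm⟩ := hbnd' n' i' r' hit' hroot'
              exact ⟨r', m, le_trans hm hn', hitm, hrm⟩)
            (fun i' hi' => h0 i' (List.mem_cons_of_mem i hi'))

-- ===== VERDICT (by name: the statement is the Claim_ definition above) =====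
theorem build_circuits_spec : Claim_equal_build_circuits := by
  intro parent num_circuits _ hpre
  unfold Spec_build_circuits build_circuits build_circuits_alt
  have h := loops_eq parent (PySem.List.pyRange 0 num_circuits 1) parent PySem.Dict.empty
    rfl (fun _ _ h => h)
    (fun i hi => ⟨(pvStep parent)^[parent.length + 1] i, parent.length + 1, le_refl _,
      rfl, hpre.2 i hi⟩)
    (fun i hi => hpre.2 i hi)
  cases hA : buildA_loop (PySem.List.pyRange 0 num_circuits 1) parent PySem.Dict.empty with
  | none => rw [hA] at h; simp at h; rw [← h]
  | some pc =>
      rw [hA] at h; simp at h; rw [← h]
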